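-- pv_equiv track=rewrite | github.com/severinbratus/puzzles | csig/09/solve.py | solution
-- ===== SOURCE A (Python) =====
-- def solution(arr):
--     max_len = len(max(arr, key=len))
--     result = []
--     for i in range(max_len):
--         for word in arr:
--             if i < len(word):
--                 result += word[i]
--     return ''.join(result)
-- ===== SOURCE B (Python) =====
-- def solution(arr):
--     # Single pass over the characters: bucket each char into its column,
--     # then join the columns.
--     cols = []
--     for word in arr:
--         for i, ch in enumerate(word):
--             if i == len(cols):
--                 cols.append([])
--             cols[i].append(ch)
--     return ''.join(''.join(c) for c in cols)
-- ===== Notes on version B (the rewrite author's own statement) =====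
-- stated objective: alternative
-- what changed: Instead of scanning the whole word list once per column (skipping short words), B makes a single pass over the words, appending each character into a per-column bucket, then joins the buckets.
import Mathlib
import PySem

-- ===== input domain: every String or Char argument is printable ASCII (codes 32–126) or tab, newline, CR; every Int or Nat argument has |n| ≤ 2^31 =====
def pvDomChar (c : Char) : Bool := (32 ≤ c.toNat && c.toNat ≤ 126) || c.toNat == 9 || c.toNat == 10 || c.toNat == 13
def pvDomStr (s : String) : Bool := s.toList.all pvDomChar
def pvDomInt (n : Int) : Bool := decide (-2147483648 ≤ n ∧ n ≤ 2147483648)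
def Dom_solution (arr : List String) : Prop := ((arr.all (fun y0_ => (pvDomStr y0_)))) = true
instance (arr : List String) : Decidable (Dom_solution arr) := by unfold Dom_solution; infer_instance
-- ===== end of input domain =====

-- B changes the algorithm: a single pass over the words bucketing each character into
-- its column, instead of one scan of the whole word list per output column.

-- ===== PORT A =====
-- max(arr, key=len) → PySem.List.max?; on [] Python raises ValueError, the port returns ""
-- there (excluded by Pre_solution).  result is a list of 1-char strings joined by ''.join;
-- ported exactly as the list of those chars, joined by String.mk.
def solution (arr : List String) : String :=
  match PySem.List.max? arr PySem.Str.len with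
  | none => ""
  | some m =>
    let maxLen := PySem.Str.len m
    let result : List Char :=
      (PySem.List.pyRange 0 maxLen).foldl (fun res i =>
        arr.foldl (fun res word =>
          if i < PySem.Str.len word then
            res ++ (PySem.List.pyGet? word.toList i).toList
          else res) res) []
    String.mk result

-- ===== PORT B =====
-- 'for i, ch in enumerate(word): (extend cols if i == len(cols)); cols[i].append(ch)'
-- walks cols and the word in lockstep:
def addWord : List (List Char) → List Char → List (List Char)
  | cols, [] => cols
  | [], c :: rest => [c] :: addWord [] rest
  | col :: cols, c :: rest => (col ++ [c]) :: addWord cols rest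

def solution_alt (arr : List String) : String :=
  let cols := arr.foldl (fun cols w => addWord cols w.toList) []
  String.mk cols.flatten   -- ''.join(''.join(c) for c in cols)

-- ===== PRECONDITION & SPEC =====
-- Pre_ excludes only the empty list, on which A raises ValueError (max of empty sequence).
def Pre_solution (arr : List String) : Prop := arr ≠ []
instance (arr : List String) : Decidable (Pre_solution arr) := by unfold Pre_solution; infer_instance
def pvWitness_solution : List String := ["ab", "c", "xyz"]

def Spec_solution (arr : List String) (out : String) : Prop := out = solution_alt arr
instance (arr : List String) (out : String) : Decidable (Spec_solution arr out) := by unfold Spec_solution; infer_instance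

-- ===== CLAIM (what is proved, stated in full; the proofs are below) =====
def Claim_equal_solution : Prop := ∀ (arr : List String), Dom_solution arr → Pre_solution arr → Spec_solution arr (solution arr)

-- ===== LEMMAS AND PROOFS =====

-- the i-th column of the transpose
def colAt (arr : List String) (i : Nat) : List Char :=
  arr.flatMap (fun w => (w.toList[i]?).toList)

-- the number of columns = running max of the word lengths
def maxLenNat (arr : List String) : Nat :=
  arr.foldl (fun n w => max n w.toList.length) 0

lemma foldl_max_le {arr : List String} {c n : Nat} (hn : n ≤ c)
    (h : ∀ w ∈ arr, w.toList.length ≤ c) :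
    arr.foldl (fun n w => max n w.toList.length) n ≤ c := by
  induction arr generalizing n with
  | nil => simpa using hn
  | cons a t ih =>
    simp only [List.foldl_cons]
    exact ih (by have := h a (by simp); omega) (fun w hw => h w (by simp [hw]))

lemma le_foldl_max {arr : List String} {n : Nat} :
    (n ≤ arr.foldl (fun n w => max n w.toList.length) n) ∧
    (∀ w ∈ arr, w.toList.length ≤ arr.foldl (fun n w => max n w.toList.length) n) := by
  induction arr generalizing n with
  | nil => simp
  | cons a t ih =>
    simp only [List.foldl_cons, List.mem_cons]
    refine ⟨le_trans (le_max_left _ _) ih.1, ?_⟩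
    rintro w (rfl | hw)
    · exact le_trans (le_max_right _ _) ih.1
    · exact ih.2 w hw

-- A's max_len equals maxLenNat on a nonempty list
lemma maxlen_eq {arr : List String} {m : String}
    (hm : PySem.List.max? arr PySem.Str.len = some m) :
    m.toList.length = maxLenNat arr := by
  have hmem := PySem.List.max?_mem hm
  have hmax := PySem.List.max?_isMax hm
  have h1 : m.toList.length ≤ maxLenNat arr := le_foldl_max.2 m hmem
  have h2 : maxLenNat arr ≤ m.toList.length := by
    refine foldl_max_le (Nat.zero_le _) (fun w hw => ?_)
    have := hmax w hw
    simp only [PySem.Str.len_eq] at this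
    exact_mod_cast this
  omega

-- ==== A's result ====
lemma inner_fold (arr : List String) (k : Nat) (res : List Char) :
    arr.foldl (fun res word =>
      if (k : Int) < PySem.Str.len word then
        res ++ (PySem.List.pyGet? word.toList (k : Int)).toList
      else res) res = res ++ colAt arr k := by
  induction arr generalizing res with
  | nil => simp [colAt]
  | cons w t ih =>
    simp only [List.foldl_cons, ih, colAt, List.flatMap_cons]
    by_cases h : (k : Int) < PySem.Str.len w
    · rw [if_pos h, PySem.List.pyGet?_natCast, List.append_assoc]
    · rw [if_neg h]
      have hk : w.toList.length ≤ k := by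
        simp only [PySem.Str.len_eq] at h; omega
      simp [List.getElem?_eq_none hk]

lemma outer_fold_aux (arr : List String) (l : List Int) (init : List Char)
    (hl : ∀ i ∈ l, 0 ≤ i) :
    l.foldl (fun res i =>
      arr.foldl (fun res word =>
        if i < PySem.Str.len word then
          res ++ (PySem.List.pyGet? word.toList i).toList
        else res) res) init = init ++ l.flatMap (fun i => colAt arr i.toNat) := by
  induction l generalizing init with
  | nil => simp
  | cons i t ih =>
    simp only [List.foldl_cons, List.flatMap_cons]
    have h0 : (0 : Int) ≤ i := hl i (by simp)
    have hi : i = ((i.toNat : Nat) : Int) := by omega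
    rw [hi, inner_fold, ih _ (fun j hj => hl j (by simp [hj])), List.append_assoc]
    congr 2

lemma outer_fold (arr : List String) (L : Nat) :
    (PySem.List.pyRange 0 (L : Int)).foldl (fun res i =>
      arr.foldl (fun res word =>
        if i < PySem.Str.len word then
          res ++ (PySem.List.pyGet? word.toList i).toList
        else res) res) [] = (List.range L).flatMap (colAt arr) := by
  rw [outer_fold_aux arr _ []
    (fun i hi => by
      rw [PySem.List.mem_pyRange_one] at hi; exact hi.1)]
  rw [PySem.List.pyRange_one]
  simp only [Int.sub_zero, Int.toNat_natCast, List.flatMap_map, List.nil_append]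
  apply List.flatMap_congr
  intro k _
  simp

lemma solution_eq {arr : List String} {m : String}
    (hm : PySem.List.max? arr PySem.Str.len = some m) :
    solution arr = String.mk ((List.range (maxLenNat arr)).flatMap (colAt arr)) := by
  unfold solution
  rw [hm]
  simp only []
  rw [PySem.Str.len_eq, maxlen_eq hm, outer_fold]

-- ==== B's result ====
def colsGet (cols : List (List Char)) (i : Nat) : List Char := (cols[i]?).getD []

lemma addWord_get (w : List Char) (cols : List (List Char)) (i : Nat) :
    colsGet (addWord cols w) i = colsGet cols i ++ (w[i]?).toList := by
  induction w generalizing cols i with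
  | nil => simp [addWord, colsGet]
  | cons c rest ih =>
    cases cols with
    | nil =>
      cases i with
      | zero => simp [addWord, colsGet]
      | succ j => simpa [addWord, colsGet] using ih [] j
    | cons col t =>
      cases i with
      | zero => simp [addWord, colsGet]
      | succ j => simpa [addWord, colsGet] using ih t j

lemma addWord_length (w : List Char) (cols : List (List Char)) :
    (addWord cols w).length = max cols.length w.length := by
  induction w generalizing cols with
  | nil => simp [addWord]
  | cons c rest ih =>
    cases cols with
    | nil => simp [addWord, ih]
    | cons col t =>
      simp only [addWord, List.length_cons, ih]
      omega

lemma fold_addWord_get (arr : List String) (cols : List (List Char)) (i : Nat) :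
    colsGet (arr.foldl (fun cols w => addWord cols w.toList) cols) i =
      colsGet cols i ++ colAt arr i := by
  induction arr generalizing cols with
  | nil => simp [colAt]
  | cons w t ih =>
    simp only [List.foldl_cons, ih, addWord_get, colAt, List.flatMap_cons,
      List.append_assoc]

lemma fold_addWord_length (arr : List String) (cols : List (List Char)) :
    (arr.foldl (fun cols w => addWord cols w.toList) cols).length =
      arr.foldl (fun n w => max n w.toList.length) cols.length := by
  induction arr generalizing cols with
  | nil => rfl
  | cons w t ih => simp only [List.foldl_cons, ih, addWord_length]

lemma flatten_eq (l : List (List Char)) :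
    l.flatten = (List.range l.length).flatMap (colsGet l) := by
  induction l with
  | nil => simp
  | cons c t ih =>
    simp only [List.flatten_cons, List.length_cons, List.range_succ_eq_map,
      List.flatMap_cons, List.flatMap_map, ih]
    congr 1

lemma solution_alt_eq (arr : List String) :
    solution_alt arr = String.mk ((List.range (maxLenNat arr)).flatMap (colAt arr)) := by
  unfold solution_alt
  simp only []
  rw [flatten_eq, fold_addWord_length]
  have hlen : ([] : List (List Char)).length = 0 := rfl
  rw [hlen]
  congr 1
  apply List.flatMap_congr
  intro i _
  rw [fold_addWord_get]
  simp [colsGet]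

-- ===== VERDICT (by name: the statement is the Claim_ definition above) =====
theorem solution_spec : Claim_equal_solution := by
  intro arr _ hpre
  unfold Spec_solution
  obtain ⟨m, hm⟩ : ∃ m, PySem.List.max? arr PySem.Str.len = some m := by
    cases h : PySem.List.max? arr PySem.Str.len with
    | none => exact absurd ((PySem.List.max?_eq_none_iff _ _).mp h) hpre
    | some m => exact ⟨m, rfl⟩
  rw [solution_eq hm, solution_alt_eq]
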